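-- pv_equiv track=rewrite | github.com/ArdeleanLucas/PARSE | python/compare/cognate_compute.py | _iter_onset_substitution_variants
-- ===== SOURCE A (Python) =====
-- from typing import Any, Dict, Iterable, List, Mapping, Optional, Sequence, Set, Tuple, TypedDict
--
-- FALLBACK_BOUNDARY_CHARS: Set[str] = {" ", "-", "_", ".", "|", "/"}
--
-- FALLBACK_ONSET_ALTERNATIONS: Tuple[Tuple[str, str], ...] = (
--     ("k", "g"),
--     ("q", "g"),
--     ("t", "d"),
--     ("p", "b"),
-- )
--
-- def _is_boundary_char(char: str) -> bool:
--     return char in FALLBACK_BOUNDARY_CHARS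
--
-- def _iter_onset_substitution_variants(form: str) -> Iterable[str]:
--     for source, target in FALLBACK_ONSET_ALTERNATIONS:
--         for left, right in ((source, target), (target, source)):
--             if not left or left == right:
--                 continue
--
--             max_start = len(form) - len(left) + 1
--             for start_idx in range(max_start):
--                 if not form.startswith(left, start_idx):
--                     continue
--                 if start_idx > 0 and not _is_boundary_char(form[start_idx - 1]):
--                     continue
--                 yield form[:start_idx] + right + form[start_idx + len(left) :]
-- ===== SOURCE B (Python) =====
-- FALLBACK_BOUNDARY_CHARS = {" ", "-", "_", ".", "|", "/"}
--
-- FALLBACK_ONSET_ALTERNATIONS = (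
--     ("k", "g"),
--     ("q", "g"),
--     ("t", "d"),
--     ("p", "b"),
-- )
--
-- # char -> ((direction index, replacement), ...), derived from the alternation
-- # table: direction 2*a is source->target of alternation a, 2*a+1 the reverse.
-- _SUBS = {
--     "k": ((0, "g"),),
--     "g": ((1, "k"), (3, "q")),
--     "q": ((2, "g"),),
--     "t": ((4, "d"),),
--     "d": ((5, "t"),),
--     "p": ((6, "b"),),
--     "b": ((7, "p"),),
-- }
--
--
-- def _iter_onset_substitution_variants(form):
--     # Single position-major pass: at each onset position, file the variant in
--     # the bucket of its substitution direction; then emit the 8 buckets in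
--     # direction order (which reproduces the direction-major emission order).
--     buckets = [[] for _ in range(8)]
--     for i in range(len(form)):
--         if i == 0 or form[i - 1] in FALLBACK_BOUNDARY_CHARS:
--             for d, rep in _SUBS.get(form[i], ()):
--                 buckets[d].append(form[:i] + rep + form[i + 1:])
--     for bucket in buckets:
--         yield from bucket
-- ===== Notes on version B (the rewrite author's own statement) =====
-- stated objective: faster
-- what changed: B replaces A's eight direction-major whole-string scans by a single position-major pass: at each onset position it looks up the character in a char->(direction,replacement) map and files each variant into one of eight direction buckets, then emits the buckets in order.
import Mathlib
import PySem

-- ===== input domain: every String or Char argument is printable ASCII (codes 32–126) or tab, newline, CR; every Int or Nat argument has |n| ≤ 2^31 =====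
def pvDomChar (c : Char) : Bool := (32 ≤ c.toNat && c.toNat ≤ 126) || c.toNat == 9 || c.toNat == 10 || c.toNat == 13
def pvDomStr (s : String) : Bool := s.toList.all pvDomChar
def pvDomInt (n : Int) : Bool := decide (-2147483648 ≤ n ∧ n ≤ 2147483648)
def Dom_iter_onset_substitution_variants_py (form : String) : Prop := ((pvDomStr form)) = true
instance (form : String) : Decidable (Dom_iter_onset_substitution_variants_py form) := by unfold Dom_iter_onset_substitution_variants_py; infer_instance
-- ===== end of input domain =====

-- B makes one position-major pass over the string, bucketing each variant by its
-- substitution direction, instead of A's eight direction-major whole-string scans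
-- (same results in the same order).

-- ===== PORT A =====
-- _is_boundary_char / FALLBACK_BOUNDARY_CHARS membership
def pvBoundaryChar (c : Char) : Bool :=
  c == ' ' || c == '-' || c == '_' || c == '.' || c == '|' || c == '/'

-- FALLBACK_ONSET_ALTERNATIONS (length-1 strings as List Char)
def pvFallbackAlternations : List (List Char × List Char) :=
  [(['k'], ['g']), (['q'], ['g']), (['t'], ['d']), (['p'], ['b'])]

-- form.startswith(left, i)  — exact for 0 ≤ i (the only calls made here)
def pvStartsAt (f left : List Char) (i : Nat) : Bool :=
  (f.drop i).take left.length == left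

-- A's body for one (left, right) direction (the inner range loop, appending onto acc)
def pvScanDir (f left right : List Char) (acc : List String) : List String :=
  if left.isEmpty || left == right then acc
  else
    -- max_start = len(form) - len(left) + 1; range(max_start); si ≥ 0 so si.toNat is exact
    (PySem.List.pyRange 0 ((f.length : Int) - (left.length : Int) + 1) 1).foldl
      (fun acc si =>
        if !pvStartsAt f left si.toNat then acc
        else if decide (0 < si.toNat) && !pvBoundaryChar (f.getD (si.toNat - 1) ' ') then acc
        else
          -- form[:i] + right + form[i+len(left):] (slices exact: 0 ≤ i ≤ len f)
          acc ++ [String.ofList (f.take si.toNat ++ right ++ f.drop (si.toNat + left.length))])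
      acc

def iter_onset_substitution_variants_py (form : String) : List String :=
  pvFallbackAlternations.foldl (fun acc st =>
    [(st.1, st.2), (st.2, st.1)].foldl (fun acc lr => pvScanDir form.toList lr.1 lr.2 acc) acc) []

-- ===== PORT B =====
-- _SUBS: char -> list of (direction index, replacement char)
def pvSubs (c : Char) : List (Nat × Char) :=
  if c = 'k' then [(0,'g')]
  else if c = 'g' then [(1,'k'),(3,'q')]
  else if c = 'q' then [(2,'g')]
  else if c = 't' then [(4,'d')]
  else if c = 'd' then [(5,'t')]
  else if c = 'p' then [(6,'b')]
  else if c = 'b' then [(7,'p')]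
  else []

-- one iteration of B's single pass: at an onset position, file each applicable
-- variant into the bucket of its direction (buckets[d].append(...))
def pvBucketStep (f : List Char) (bs : List (List String)) (i : Nat) : List (List String) :=
  if decide (i = 0) || pvBoundaryChar (f.getD (i-1) ' ') then
    (pvSubs (f.getD i ' ')).foldl
      (fun bs dr => bs.modify dr.1 (· ++ [String.ofList (f.take i ++ [dr.2] ++ f.drop (i+1))]))
      bs
  else bs

def iter_onset_substitution_variants_py_alt (form : String) : List String :=
  let f := form.toList
  ((List.range f.length).foldl (pvBucketStep f) [[],[],[],[],[],[],[],[]]).flatten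

-- ===== PRECONDITION & SPEC =====
def Spec_iter_onset_substitution_variants_py (form : String) (out : List String) : Prop := out = iter_onset_substitution_variants_py_alt form
instance (form : String) (out : List String) : Decidable (Spec_iter_onset_substitution_variants_py form out) := by unfold Spec_iter_onset_substitution_variants_py; infer_instance

-- ===== CLAIM (what is proved, stated in full; the proofs are below) =====
def Claim_equal_iter_onset_substitution_variants_py : Prop := ∀ (form : String), Dom_iter_onset_substitution_variants_py form → Spec_iter_onset_substitution_variants_py form (iter_onset_substitution_variants_py form)

-- ===== LEMMAS AND PROOFS =====

-- the 8 directions in emission order: (bucket index, source char, replacement char)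
def pvDirList : List (Nat × Char × Char) :=
  [(0,'k','g'),(1,'g','k'),(2,'q','g'),(3,'g','q'),(4,'t','d'),(5,'d','t'),(6,'p','b'),(7,'b','p')]

-- what position i contributes to bucket d in B's pass
def pvContrib (f : List Char) (i d : Nat) : List String :=
  if decide (i = 0) || pvBoundaryChar (f.getD (i-1) ' ') then
    ((pvSubs (f.getD i ' ')).filter (fun dr => dr.1 == d)).map
      (fun dr => String.ofList (f.take i ++ [dr.2] ++ f.drop (i+1)))
  else []

-- the per-direction result both programs produce
def pvDirRes (f : List Char) (l r : Char) : List String :=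
  ((List.range f.length).filter
      (fun i => pvStartsAt f [l] i && (decide (i = 0) || pvBoundaryChar (f.getD (i-1) ' ')))).map
    (fun i => String.ofList (f.take i ++ [r] ++ f.drop (i + 1)))

-- ---- A side ----

-- skip/skip/append fold = filter-map (generic shape of A's inner loop)
theorem pv_fold_skip_skip {α β : Type} (p q : α → Bool) (g : α → β) :
    ∀ (xs : List α) (acc : List β),
      xs.foldl (fun acc i => if p i then acc else if q i then acc else acc ++ [g i]) acc
        = acc ++ ((xs.filter (fun i => !p i && !q i)).map g) := by
  intro xs
  induction xs with
  | nil => intro acc; simp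
  | cons x t ih =>
    intro acc
    cases hp : p x <;> cases hq : q x <;>
      simp [List.foldl_cons, hp, hq, ih]

-- A's combined keep-condition equals the (startswith ∧ onset) condition pointwise
theorem pv_cond_eq (f : List Char) (l : List Char) (i : Nat) :
    (!(!pvStartsAt f l i) && !(decide (0 < i) && !pvBoundaryChar (f.getD (i - 1) ' ')))
      = (pvStartsAt f l i && (decide (i = 0) || pvBoundaryChar (f.getD (i - 1) ' '))) := by
  cases i with
  | zero => simp
  | succ n =>
    cases hs : pvStartsAt f l (n + 1) <;> cases hb : pvBoundaryChar (f.getD n ' ') <;> simp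

-- A: one direction scan appends exactly pvDirRes
theorem pv_scan_dir_eq (f : List Char) (l r : Char) (acc : List String) (h : l ≠ r) :
    pvScanDir f [l] [r] acc = acc ++ pvDirRes f l r := by
  unfold pvScanDir pvDirRes
  have hA : (([l] : List Char).isEmpty || [l] == [r]) = false := by simp [h]
  rw [hA]
  simp only [Bool.false_eq_true, if_false]
  have hlen : ((f.length : Int) - (([l] : List Char).length : Int) + 1) = (f.length : Int) := by
    simp
  rw [hlen, PySem.List.pyRange_zero_natCast, List.foldl_map]
  simp only [Int.toNat_natCast, List.length_singleton]
  refine (pv_fold_skip_skip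
    (fun i => !pvStartsAt f [l] i)
    (fun i => decide (0 < i) && !pvBoundaryChar (f.getD (i - 1) ' '))
    (fun i => String.ofList (f.take i ++ [r] ++ f.drop (i + 1)))
    (List.range f.length) acc).trans ?_
  congr 1
  exact congrArg _ (List.filter_congr (fun i _ => pv_cond_eq f [l] i))

-- ---- B side ----

theorem pvSubs_dir_lt (c : Char) (dr : Nat × Char) (h : dr ∈ pvSubs c) : dr.1 < 8 := by
  unfold pvSubs at h
  split_ifs at h <;> simp_all <;> (rcases h with h|h) <;> simp_all

-- inner foldl over the substitution list = append to each bucket its filtered share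
theorem pv_inner_fold (g : Char → String) :
    ∀ (drs : List (Nat × Char)) (bs : List (List String)),
      (∀ dr ∈ drs, dr.1 < bs.length) →
      drs.foldl (fun bs dr => bs.modify dr.1 (· ++ [g dr.2])) bs
        = bs.mapIdx (fun d b => b ++ (drs.filter (fun dr => dr.1 == d)).map (fun dr => g dr.2)) := by
  intro drs
  induction drs with
  | nil =>
    intro bs _
    apply List.ext_getElem (by simp)
    intro n h1 h2
    simp [List.getElem_mapIdx]
  | cons dr t ih =>
    intro bs hlt
    rw [List.foldl_cons, ih _ (by
      intro x hx
      simpa using hlt x (List.mem_cons_of_mem _ hx))]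
    apply List.ext_getElem (by simp)
    intro n h1 h2
    simp only [List.getElem_mapIdx, List.getElem_modify, List.filter_cons]
    by_cases hd : dr.1 = n
    · simp [hd, List.append_assoc]
    · have : (dr.1 == n) = false := by simp [hd]
      simp [hd, this]

-- B's whole pass, on any 8-bucket state: each bucket gains its positions' contributions
theorem pv_outer_fold (f : List Char) :
    ∀ (xs : List Nat) (bs : List (List String)), bs.length = 8 →
      xs.foldl (pvBucketStep f) bs
        = bs.mapIdx (fun d b => b ++ xs.flatMap (fun i => pvContrib f i d)) := by
  intro xs
  induction xs with
  | nil =>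
    intro bs _
    apply List.ext_getElem (by simp)
    intro n h1 h2
    simp [List.getElem_mapIdx]
  | cons x t ih =>
    intro bs hbs
    rw [List.foldl_cons]
    have hstep : pvBucketStep f bs x = bs.mapIdx (fun d b => b ++ pvContrib f x d) := by
      unfold pvBucketStep pvContrib
      by_cases hc : (decide (x = 0) || pvBoundaryChar (f.getD (x-1) ' ')) = true
      · rw [if_pos hc]
        rw [pv_inner_fold (fun rep => String.ofList (f.take x ++ [rep] ++ f.drop (x+1)))
            _ bs (fun dr hdr => hbs ▸ pvSubs_dir_lt _ dr hdr)]
        apply List.ext_getElem (by simp)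
        intro n h1 h2
        simp only [List.getElem_mapIdx, if_pos hc]
      · rw [if_neg hc]
        apply List.ext_getElem (by simp)
        intro n h1 h2
        simp only [List.getElem_mapIdx]
        rw [if_neg hc]
        simp
    rw [hstep, ih _ (by simp [hbs])]
    apply List.ext_getElem (by simp)
    intro n h1 h2
    simp [List.getElem_mapIdx, List.append_assoc]

-- flatMap of an if-singleton = map over filter
theorem pv_flatMap_if {α β : Type} (p : α → Bool) (g : α → β) :
    ∀ (xs : List α),
      xs.flatMap (fun i => if p i then [g i] else []) = (xs.filter p).map g := by
  intro xs
  induction xs with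
  | nil => simp
  | cons x t ih =>
    cases hp : p x <;> simp [List.flatMap_cons, hp, ih]

-- startswith for a single char in terms of getD
theorem pv_startsAt_single (f : List Char) (l : Char) (hl : l ≠ ' ') (i : Nat) :
    pvStartsAt f [l] i = (decide (i < f.length) && (f.getD i ' ' == l)) := by
  unfold pvStartsAt
  rcases Nat.lt_or_ge i f.length with h|h
  · rw [List.drop_eq_getElem_cons h]
    simp only [List.length_singleton, List.take_succ_cons, List.take_zero]
    simp [h]
  · have hd : f.drop i = [] := List.drop_eq_nil_of_le h
    simp [hd, Nat.not_lt.mpr h]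

-- the filtered substitution list of an arbitrary char, per direction
theorem pv_subs_filter (c : Char) (d : Nat) (l r : Char) (h : (d, l, r) ∈ pvDirList) :
    ((pvSubs c).filter (fun dr => dr.1 == d)) = if c == l then [(d, r)] else [] := by
  simp only [pvDirList, List.mem_cons, List.not_mem_nil, or_false] at h
  unfold pvSubs
  rcases h with h|h|h|h|h|h|h|h <;>
    (injection h with h1 h2; injection h2 with h2 h3; subst h1 h2 h3) <;>
    split_ifs with h1 h2 h3 h4 h5 h6 h7 <;> simp_all

-- one bucket of B = pvDirRes of its direction
theorem pv_bucket_eq (f : List Char) (d : Nat) (l r : Char) (h : (d, l, r) ∈ pvDirList)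
    (hl : l ≠ ' ') :
    (List.range f.length).flatMap (fun i => pvContrib f i d) = pvDirRes f l r := by
  have hpt : ∀ i, pvContrib f i d
      = (if (pvStartsAt f [l] i && (decide (i = 0) || pvBoundaryChar (f.getD (i-1) ' '))) then
          [String.ofList (f.take i ++ [r] ++ f.drop (i+1))] else []) := by
    intro i
    unfold pvContrib
    rw [pv_subs_filter (f.getD i ' ') d l r h, pv_startsAt_single f l hl i]
    by_cases hb : (decide (i = 0) || pvBoundaryChar (f.getD (i-1) ' ')) = true
    · rw [if_pos hb]
      have hb' : i = 0 ∨ pvBoundaryChar (f[i-1]?.getD ' ') = true := by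
        simpa [List.getD_eq_getElem?_getD] using hb
      rcases Nat.lt_or_ge i f.length with hlen|hlen
      · by_cases hc : f[i] = l
        · simp [hc, hb', hlen]
        · simp [hc, List.getElem?_eq_getElem hlen]
      · simp [Ne.symm hl, Nat.not_lt.mpr hlen]
    · rw [if_neg hb]
      have hb' : ¬i = 0 ∧ pvBoundaryChar (f[i-1]?.getD ' ') = false := by
        simpa [List.getD_eq_getElem?_getD] using hb
      simp [hb'.1, hb'.2]
  have h2 : (List.range f.length).flatMap (fun i => pvContrib f i d)
      = (List.range f.length).flatMap (fun i =>
          if (pvStartsAt f [l] i && (decide (i = 0) || pvBoundaryChar (f.getD (i-1) ' '))) then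
            [String.ofList (f.take i ++ [r] ++ f.drop (i+1))] else []) := by
    simp only [hpt]
  rw [h2]
  exact pv_flatMap_if _ _ _

-- ===== VERDICT (by name: the statement is the Claim_ definition above) =====
theorem iter_onset_substitution_variants_py_spec : Claim_equal_iter_onset_substitution_variants_py := by
  intro form _
  show _ = _
  have hB : iter_onset_substitution_variants_py_alt form
      = pvDirRes form.toList 'k' 'g' ++ pvDirRes form.toList 'g' 'k'
        ++ pvDirRes form.toList 'q' 'g' ++ pvDirRes form.toList 'g' 'q'
        ++ pvDirRes form.toList 't' 'd' ++ pvDirRes form.toList 'd' 't'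
        ++ pvDirRes form.toList 'p' 'b' ++ pvDirRes form.toList 'b' 'p' := by
    rw [show iter_onset_substitution_variants_py_alt form
        = ((List.range form.toList.length).foldl (pvBucketStep form.toList)
            [[],[],[],[],[],[],[],[]]).flatten from rfl]
    rw [pv_outer_fold form.toList (List.range form.toList.length) _ (by rfl)]
    simp only [List.mapIdx_cons, List.mapIdx_nil, List.nil_append, List.flatten,
      List.append_nil, Nat.zero_add]
    norm_num
    have hr : List.range form.length = List.range form.toList.length := by simp
    rw [hr]
    rw [pv_bucket_eq _ 0 'k' 'g' (by decide) (by decide),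
        pv_bucket_eq _ 1 'g' 'k' (by decide) (by decide),
        pv_bucket_eq _ 2 'q' 'g' (by decide) (by decide),
        pv_bucket_eq _ 3 'g' 'q' (by decide) (by decide),
        pv_bucket_eq _ 4 't' 'd' (by decide) (by decide),
        pv_bucket_eq _ 5 'd' 't' (by decide) (by decide),
        pv_bucket_eq _ 6 'p' 'b' (by decide) (by decide),
        pv_bucket_eq _ 7 'b' 'p' (by decide) (by decide)]
  rw [hB]
  simp only [iter_onset_substitution_variants_py, pvFallbackAlternations,
    List.foldl_cons, List.foldl_nil]
  rw [pv_scan_dir_eq _ 'k' 'g' _ (by decide), pv_scan_dir_eq _ 'g' 'k' _ (by decide),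
      pv_scan_dir_eq _ 'q' 'g' _ (by decide), pv_scan_dir_eq _ 'g' 'q' _ (by decide),
      pv_scan_dir_eq _ 't' 'd' _ (by decide), pv_scan_dir_eq _ 'd' 't' _ (by decide),
      pv_scan_dir_eq _ 'p' 'b' _ (by decide), pv_scan_dir_eq _ 'b' 'p' _ (by decide)]
  simp [List.append_assoc]
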